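-- pv_equiv track=rewrite | github.com/omarfessi/servier | servier/utils/helpers.py | journal_with_max_distinct_drugs
-- ===== SOURCE A (Python) =====
-- from typing import (
--     Iterable,
--     Iterator,
--     List,
-- )
--
-- def journal_with_max_distinct_drugs(sorted_groups: Iterable) -> str:
--     """
--     Determines the journal that mentions the maximum number of distinct drugs.
--     Args:
--         sorted_groups (Iterable): An iterable of tuples where each tuple contains a journal name and a list of dictionaries.
--                                   Each dictionary represents a drug entry with a "drug" key.
--     Returns:
--         str: The name of the journal that mentions the maximum number of distinct drugs.
--     """
--
--     journals_with_distinct_drugs_count = []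
--     max_of_disctinct_drugs_mentionned_by_any_journal = 0
--     for journal, data_grouped_by_journal in sorted_groups:
--         list_of_drugs = [item["drug"] for item in data_grouped_by_journal]
--         count_of_distinct_drugs_per_journal = len(set(list_of_drugs))
--         if (
--             count_of_distinct_drugs_per_journal
--             > max_of_disctinct_drugs_mentionned_by_any_journal
--         ):
--             max_of_disctinct_drugs_mentionned_by_any_journal = (
--                 count_of_distinct_drugs_per_journal
--             )
--             journals_with_distinct_drugs_count.append(
--                 (journal, count_of_distinct_drugs_per_journal)
--             )
--     max = filter(
--         lambda x: x[1] == max_of_disctinct_drugs_mentionned_by_any_journal,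
--         journals_with_distinct_drugs_count,
--     )
--     return list(max)[0]
-- ===== SOURCE B (Python) =====
-- def journal_with_max_distinct_drugs(sorted_groups):
--     candidates = [
--         (journal, len({item["drug"] for item in data}))
--         for journal, data in sorted_groups
--     ]
--     return sorted(candidates, key=lambda c: c[1], reverse=True)[0]
-- ===== Notes on version B (the rewrite author's own statement) =====
-- stated objective: alternative
-- what changed: A's single pass with a running max, conditional appends and a final filter/[0] is replaced by staged passes: build the full (journal, distinct-count) candidate list, stable-sort it by count descending, and return the first element; stability of Python's sort gives the same first-on-ties tuple.
import Mathlib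
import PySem

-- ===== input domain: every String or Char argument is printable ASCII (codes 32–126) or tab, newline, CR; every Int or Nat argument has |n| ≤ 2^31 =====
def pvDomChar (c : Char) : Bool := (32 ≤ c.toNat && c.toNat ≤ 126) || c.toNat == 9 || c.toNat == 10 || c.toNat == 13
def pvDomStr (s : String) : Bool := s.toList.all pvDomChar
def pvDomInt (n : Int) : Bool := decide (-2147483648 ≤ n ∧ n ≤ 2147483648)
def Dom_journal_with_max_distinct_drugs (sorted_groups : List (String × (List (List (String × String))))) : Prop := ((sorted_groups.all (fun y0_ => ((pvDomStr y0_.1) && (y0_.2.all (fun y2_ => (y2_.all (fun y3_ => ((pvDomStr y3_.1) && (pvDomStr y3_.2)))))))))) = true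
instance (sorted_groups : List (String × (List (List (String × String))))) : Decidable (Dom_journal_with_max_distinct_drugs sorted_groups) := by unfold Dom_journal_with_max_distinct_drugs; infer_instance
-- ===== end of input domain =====

-- B replaces A's one-pass running-max loop + filter + [0] by staged passes (build the full
-- candidate list, stable reverse-sort it by count, take the first element); objective:
-- alternative. Equivalence of the RETURN value on Pre_ is what is proved.

-- ===== PORT A =====
-- distinct-drug count of one group's data: len(set([item["drug"] for item in data]))
def pvDrugCount (data : List (List (String × String))) : Int :=
  ((PySem.Set.ofList (data.map (fun item => (PySem.Dict.get? ⟨item⟩ "drug").getD ""))).length : Int)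

def journal_with_max_distinct_drugs (sorted_groups : List (String × (List (List (String × String))))) : String × Int :=
  -- the loop: append (journal, count) whenever count exceeds the running max
  let st := sorted_groups.foldl
    (fun (acc : List (String × Int) × Int) g =>
      let c := pvDrugCount g.2
      if acc.2 < c then (acc.1 ++ [(g.1, c)], c) else acc)
    ([], 0)
  -- filter(lambda x: x[1] == max_, ...); list(max)[0]  (IndexError = none, excluded by Pre_)
  (PySem.List.pyGet? (st.1.filter (fun x => x.2 == st.2)) 0).getD ("", 0)

-- ===== PORT B =====
def journal_with_max_distinct_drugs_alt (sorted_groups : List (String × (List (List (String × String))))) : String × Int :=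
  let candidates := sorted_groups.map (fun g => (g.1, pvDrugCount g.2))
  -- sorted(candidates, key=lambda c: c[1], reverse=True)[0]; IndexError on [] = none, excluded by Pre_
  (PySem.List.pyGet? (PySem.List.sorted candidates (fun c => c.2) true) 0).getD ("", 0)

-- ===== PRECONDITION & SPEC =====
-- Pre_ excludes exactly the inputs where the Python programs raise: a KeyError when some
-- item lacks the "drug" key, and A's IndexError when every group's data list is empty
-- (then no candidate is ever appended); A returns on every input satisfying Pre_.
def Pre_journal_with_max_distinct_drugs (sorted_groups : List (String × (List (List (String × String))))) : Prop :=
  (∃ g ∈ sorted_groups, g.2 ≠ []) ∧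
  (∀ g ∈ sorted_groups, ∀ item ∈ g.2, (PySem.Dict.get? ⟨item⟩ "drug").isSome = true)
instance (sorted_groups : List (String × (List (List (String × String))))) : Decidable (Pre_journal_with_max_distinct_drugs sorted_groups) := by unfold Pre_journal_with_max_distinct_drugs; infer_instance

def pvWitness_journal_with_max_distinct_drugs : (List (String × (List (List (String × String))))) :=
  [("JAMA", [[("drug", "ASPIRIN")], [("drug", "IBUPROFEN")]]), ("Nature", [[("drug", "ASPIRIN")]])]

def Spec_journal_with_max_distinct_drugs (sorted_groups : List (String × (List (List (String × String))))) (out : String × Int) : Prop := out = journal_with_max_distinct_drugs_alt sorted_groups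
instance (sorted_groups : List (String × (List (List (String × String))))) (out : String × Int) : Decidable (Spec_journal_with_max_distinct_drugs sorted_groups out) := by unfold Spec_journal_with_max_distinct_drugs; infer_instance

-- ===== CLAIM (what is proved, stated in full; the proofs are below) =====
def Claim_equal_journal_with_max_distinct_drugs : Prop := ∀ (sorted_groups : List (String × (List (List (String × String))))), Dom_journal_with_max_distinct_drugs sorted_groups → Pre_journal_with_max_distinct_drugs sorted_groups → Spec_journal_with_max_distinct_drugs sorted_groups (journal_with_max_distinct_drugs sorted_groups)
-- ===== LEMMAS AND PROOFS =====

-- A's loop step, and the running-first-max step both final results reduce to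
def pvStepA (acc : List (String × Int) × Int) (x : String × Int) : List (String × Int) × Int :=
  if acc.2 < x.2 then (acc.1 ++ [x], x.2) else acc
def pvStepB (acc : Option (String × Int)) (x : String × Int) : Option (String × Int) :=
  match acc with
  | none => some x
  | some m => if m.2 < x.2 then some x else some m
def pvBest (b : String × Int) (cs : List (String × Int)) : String × Int :=
  cs.foldl (fun m x => if m.2 < x.2 then x else m) b

lemma pvStepB_some (cs : List (String × Int)) (b : String × Int) :
    cs.foldl pvStepB (some b) = some (pvBest b cs) := by
  induction cs generalizing b with
  | nil => rfl
  | cons y t ih =>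
    simp only [List.foldl_cons, pvStepB, pvBest]
    by_cases h : b.2 < y.2 <;> simp [h, ih, pvBest]

-- head of an insertBy step = the pvStepB step on heads
lemma pvHead_insertBy (x : String × Int) (ys : List (String × Int)) :
    (PySem.List.insertBy (fun a b => decide (b.2 < a.2)) x ys).head? =
    pvStepB ys.head? x := by
  cases ys with
  | nil => rfl
  | cons y t =>
    simp only [PySem.List.insertBy, pvStepB, List.head?_cons]
    by_cases h : y.2 < x.2 <;> simp [h]

-- head? of the insertBy fold from any accumulator = the pvStepB fold from its head?
lemma pvHead_foldl (cs : List (String × Int)) (acc : List (String × Int)) :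
    (cs.foldl (fun a x => PySem.List.insertBy (fun p q => decide (q.2 < p.2)) x a) acc).head? =
    cs.foldl pvStepB acc.head? := by
  induction cs generalizing acc with
  | nil => rfl
  | cons x t ih => simp only [List.foldl_cons, ih, pvHead_insertBy]

-- xs[0] is xs.head?
lemma pvPyGet0 (xs : List (String × Int)) : PySem.List.pyGet? xs 0 = xs.head? := by
  cases xs <;> simp [PySem.List.pyGet?, PySem.List.pyIdx?]

-- main invariant: starting from a state lst ++ [b] whose earlier entries all have count < b.2,
-- the filter over A's final list is exactly the singleton of the running best
lemma pvLoop_spec (cs : List (String × Int)) (lst : List (String × Int)) (b : String × Int)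
    (h : ∀ y ∈ lst, y.2 < b.2) :
    (cs.foldl pvStepA (lst ++ [b], b.2)).2 = (pvBest b cs).2 ∧
    (cs.foldl pvStepA (lst ++ [b], b.2)).1.filter
        (fun x => x.2 == (cs.foldl pvStepA (lst ++ [b], b.2)).2) = [pvBest b cs] := by
  induction cs generalizing lst b with
  | nil =>
    refine ⟨rfl, ?_⟩
    simp only [List.foldl_nil, pvBest, List.filter_append]
    rw [List.filter_eq_nil_iff.mpr (by intro y hy; simpa using Int.ne_of_lt (h y hy))]
    simp
  | cons x t ih =>
    by_cases hx : b.2 < x.2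
    · have h' : ∀ y ∈ lst ++ [b], y.2 < x.2 := by
        intro y hy
        rcases List.mem_append.mp hy with h1 | h1
        · exact lt_trans (h y h1) hx
        · simpa [List.mem_singleton.mp h1] using hx
      have := ih (lst ++ [b]) x h'
      simpa [pvStepA, hx, pvBest] using this
    · have := ih lst b h
      simpa [pvStepA, hx, pvBest] using this

-- the pvStepB fold from a zero-count seed equals the fold from none, as long as some later
-- count is positive and all counts are nonnegative
lemma pvSeed_zero (cs : List (String × Int)) (x : String × Int) (hx : x.2 = 0)
    (hnn : ∀ y ∈ cs, 0 ≤ y.2) (hpos : ∃ y ∈ cs, 0 < y.2) :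
    cs.foldl pvStepB (some x) = cs.foldl pvStepB none := by
  induction cs generalizing x with
  | nil => simp at hpos
  | cons y t ih =>
    by_cases hy : 0 < y.2
    · simp [pvStepB, hx, hy]
    · have hy0 : y.2 = 0 := le_antisymm (not_lt.mp hy) (hnn y (by simp))
      have hpos' : ∃ z ∈ t, 0 < z.2 := by
        rcases hpos with ⟨z, hz, hzp⟩
        rcases List.mem_cons.mp hz with h1 | h1
        · exact absurd (h1 ▸ hzp) (by simp [hy0])
        · exact ⟨z, h1, hzp⟩
      have hnn' : ∀ z ∈ t, 0 ≤ z.2 := fun z hz => hnn z (by simp [hz])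
      simp only [List.foldl_cons, pvStepB, hx, hy0, lt_self_iff_false, if_false]
      rw [ih x hx hnn' hpos', ih y hy0 hnn' hpos']

-- A's filter/[0] result is the running first-max
lemma pvCoreA (cs : List (String × Int)) (hnn : ∀ y ∈ cs, 0 ≤ y.2) (hpos : ∃ y ∈ cs, 0 < y.2) :
    (PySem.List.pyGet? ((cs.foldl pvStepA ([], 0)).1.filter
        (fun x => x.2 == (cs.foldl pvStepA ([], 0)).2)) 0).getD ("", 0) =
    (cs.foldl pvStepB none).getD ("", 0) := by
  induction cs with
  | nil => simp at hpos
  | cons x t ih =>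
    by_cases hx : 0 < x.2
    · have hstep : pvStepA ([], 0) x = ([] ++ [x], x.2) := by simp [pvStepA, hx]
      have hmain := pvLoop_spec t [] x (by simp)
      simp only [List.foldl_cons, hstep]
      rw [hmain.2]
      have hB : pvStepB none x = some x := rfl
      simp only [hB]
      rw [pvStepB_some]
      simp [PySem.List.pyGet?, PySem.List.pyIdx?]
    · have hx0 : x.2 = 0 := le_antisymm (not_lt.mp hx) (hnn x (by simp))
      have hpos' : ∃ y ∈ t, 0 < y.2 := by
        rcases hpos with ⟨z, hz, hzp⟩
        rcases List.mem_cons.mp hz with h1 | h1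
        · exact absurd (h1 ▸ hzp) (by simp [hx0])
        · exact ⟨z, h1, hzp⟩
      have hnn' : ∀ y ∈ t, 0 ≤ y.2 := fun y hy => hnn y (by simp [hy])
      have hA : pvStepA ([], 0) x = ([], 0) := by simp [pvStepA, hx0]
      have hB : pvStepB none x = some x := rfl
      simp only [List.foldl_cons, hA, hB]
      rw [pvSeed_zero t x hx0 hnn' hpos']
      exact ih hnn' hpos'

-- the core equivalence on candidate lists: A's value = head of the stable reverse sort
lemma pvCore (cs : List (String × Int)) (hnn : ∀ y ∈ cs, 0 ≤ y.2) (hpos : ∃ y ∈ cs, 0 < y.2) :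
    (PySem.List.pyGet? ((cs.foldl pvStepA ([], 0)).1.filter
        (fun x => x.2 == (cs.foldl pvStepA ([], 0)).2)) 0).getD ("", 0) =
    (PySem.List.pyGet? (PySem.List.sorted cs (fun c => c.2) true) 0).getD ("", 0) := by
  have h := pvCoreA cs hnn hpos
  rw [pvPyGet0] at h
  rw [pvPyGet0, pvPyGet0, PySem.List.sorted_rev_eq_foldl_insertBy, pvHead_foldl]
  exact h

lemma pvDrugCount_pos (data : List (List (String × String))) (h : data ≠ []) :
    0 < pvDrugCount data := by
  unfold pvDrugCount
  have hne : data.map (fun item => (PySem.Dict.get? ⟨item⟩ "drug").getD "") ≠ [] := by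
    simpa using h
  rcases List.exists_mem_of_ne_nil _ hne with ⟨v, hv⟩
  have hv' : v ∈ PySem.Set.ofList (data.map (fun item => (PySem.Dict.get? ⟨item⟩ "drug").getD "")) := by
    rw [← PySem.List.dedup_eq_ofList]
    exact (PySem.List.mem_dedup _ _).mpr hv
  have := List.length_pos_of_mem hv'
  exact_mod_cast this

-- ===== VERDICT (by name: the statement is the Claim_ definition above) =====
theorem journal_with_max_distinct_drugs_spec : Claim_equal_journal_with_max_distinct_drugs := by
  intro sg _ hpre
  unfold Spec_journal_with_max_distinct_drugs
  unfold journal_with_max_distinct_drugs journal_with_max_distinct_drugs_alt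
  have hfold : sg.foldl
      (fun (acc : List (String × Int) × Int) g =>
        let c := pvDrugCount g.2
        if acc.2 < c then (acc.1 ++ [(g.1, c)], c) else acc)
      ([], 0) =
      (sg.map (fun g => (g.1, pvDrugCount g.2))).foldl pvStepA ([], 0) := by
    rw [List.foldl_map]
    rfl
  have hnn : ∀ y ∈ sg.map (fun g => (g.1, pvDrugCount g.2)), 0 ≤ y.2 := by
    intro y hy
    rcases List.mem_map.mp hy with ⟨g, _, rfl⟩
    exact Int.natCast_nonneg _
  have hpos : ∃ y ∈ sg.map (fun g => (g.1, pvDrugCount g.2)), 0 < y.2 := by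
    rcases hpre.1 with ⟨g, hg, hne⟩
    exact ⟨(g.1, pvDrugCount g.2), List.mem_map.mpr ⟨g, hg, rfl⟩, pvDrugCount_pos g.2 hne⟩
  have := pvCore (sg.map (fun g => (g.1, pvDrugCount g.2))) hnn hpos
  simp only [hfold]
  exact this
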